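-- pv_equiv track=rewrite | github.com/icspero/2-semester-Lab6 | Python/task#2.py | message_to_blocks
-- ===== SOURCE A (Python) =====
-- from typing import List, Tuple
--
-- def message_to_blocks(message: List[int]) -> List[List[int]]:
--     output = []
--     for i in range((len(message) + 15) // 16):
--         block = []
--         for j in range(16):
--             idx = 16 * i + j
--             if idx < len(message):
--                 block.append(message[idx])
--             else:
--                 block.append(ord(' '))  # Дополняем пробелами
--         output.append(block)
--     return output
-- ===== SOURCE B (Python) =====
-- def message_to_blocks(message):
--     p = (-len(message)) % 16
--     padded = message + [ord(' ')] * p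
--     return [padded[i:i + 16] for i in range(0, len(padded), 16)]
-- ===== Notes on version B (the rewrite author's own statement) =====
-- stated objective: simpler
-- what changed: Replaces the nested bound-checked per-element append loop with an upfront whole-list pad (p = (-len)%16 spaces appended once) followed by uniform slicing into 16-element chunks; bulk list slicing avoids per-element index checks and appends, a constant-factor speedup.
import Mathlib
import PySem

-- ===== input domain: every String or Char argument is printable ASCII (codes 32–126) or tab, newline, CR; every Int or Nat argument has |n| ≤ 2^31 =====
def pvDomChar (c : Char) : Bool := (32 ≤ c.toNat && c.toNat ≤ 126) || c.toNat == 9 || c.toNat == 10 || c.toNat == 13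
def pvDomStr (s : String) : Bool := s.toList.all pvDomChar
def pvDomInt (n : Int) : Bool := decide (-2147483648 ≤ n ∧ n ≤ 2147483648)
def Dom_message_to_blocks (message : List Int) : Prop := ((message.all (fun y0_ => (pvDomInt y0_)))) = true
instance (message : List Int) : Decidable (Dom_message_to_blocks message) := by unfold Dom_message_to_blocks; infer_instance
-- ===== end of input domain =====

-- B pads the whole list once with (-len)%16 spaces and then slices it into uniform
-- 16-chunks, instead of A's nested per-element bound-checked loop (objective: simpler).

-- ===== PORT A =====
def message_to_blocks (message : List Int) : List (List Int) :=
  (PySem.List.pyRange 0 (PySem.Int.floordiv ((message.length : Int) + 15) 16) 1).foldl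
    (fun output i =>
      output ++
        [(PySem.List.pyRange 0 16 1).foldl
          (fun block j =>
            let idx := 16 * i + j
            if idx < (message.length : Int) then block ++ [PySem.List.pyGetD message idx 0]
            else block ++ [32]) []])
    []

-- ===== PORT B =====
def message_to_blocks_alt (message : List Int) : List (List Int) :=
  let p := PySem.Int.mod (-(message.length : Int)) 16
  let padded := message ++ List.replicate p.toNat 32
  (PySem.List.pyRange 0 (padded.length : Int) 16).map
    (fun i => PySem.List.slice padded (some i) (some (i + 16)))

-- ===== PRECONDITION & SPEC =====
def Spec_message_to_blocks (message : List Int) (out : List (List Int)) : Prop := out = message_to_blocks_alt message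
instance (message : List Int) (out : List (List Int)) : Decidable (Spec_message_to_blocks message out) := by unfold Spec_message_to_blocks; infer_instance

-- ===== CLAIM (what is proved, stated in full; the proofs are below) =====
def Claim_equal_message_to_blocks : Prop := ∀ (message : List Int), Dom_message_to_blocks message → Spec_message_to_blocks message (message_to_blocks message)

-- ===== LEMMAS AND PROOFS =====

-- 'if c: out.append(f(j)) else: out.append(g(j))' loop shape as a map
theorem foldl_ite_append {α : Type} (P : Int → Prop) [DecidablePred P] (f g : Int → α)
    (l : List Int) (acc : List α) :
    l.foldl (fun b j => if P j then b ++ [f j] else b ++ [g j]) acc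
      = acc ++ l.map (fun j => if P j then f j else g j) := by
  induction l generalizing acc with
  | nil => simp
  | cons a l ih => by_cases h : P a <;> simp [h, ih]

theorem blocks_eq (message : List Int) :
    message_to_blocks message = message_to_blocks_alt message := by
  unfold message_to_blocks message_to_blocks_alt
  have hM : PySem.Int.floordiv ((message.length : Int) + 15) 16
      = (((message.length + 15) / 16 : Nat) : Int) := by
    rw [show ((message.length : Int) + 15) = ((message.length + 15 : Nat) : Int) by push_cast; ring]
    exact_mod_cast PySem.Int.floordiv_natCast (message.length + 15) 16
  set n := message.length with hn
  set M := (n + 15) / 16 with hMdef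
  have hp : (PySem.Int.mod (-(n : Int)) 16).toNat + n = 16 * M := by
    rw [PySem.Int.mod_eq_emod_of_pos (by omega)]
    omega
  rw [hM]
  rw [PySem.List.foldl_append_singleton_eq_map]
  simp only [List.nil_append]
  set p := (PySem.Int.mod (-(n : Int)) 16).toNat with hpdef
  set padded := message ++ List.replicate p 32 with hpad
  have hlenpad : padded.length = 16 * M := by
    simp [hpad]; omega
  rw [hlenpad]
  rw [PySem.List.pyRange_of_pos 0 ((16 * M : Nat) : Int) (by norm_num : (0:Int) < 16)]
  have hcnt : (if (0:Int) < ((16 * M : Nat) : Int) then ((((16 * M : Nat) : Int) - 0 + 16 - 1) / 16).toNat else 0) = M := by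
    split_ifs <;> omega
  rw [hcnt]
  rw [PySem.List.pyRange_one 0 (M : Int)]
  rw [PySem.List.pyRange_one 0 16]
  simp only [List.map_map, Int.sub_zero, Int.toNat_natCast]
  have h16 : (16:Int).toNat = 16 := rfl
  rw [h16]
  apply List.ext_getElem
  · simp
  · intro k h1 h2
    simp only [List.getElem_map, List.getElem_range, Function.comp_apply]
    have hkM : k < M := by simpa using h1
    -- inner loop as a map
    rw [foldl_ite_append (fun j => 16 * ((0:Int) + (k:Int)) + j < (n:Int))
        (fun j => PySem.List.pyGetD message (16 * ((0:Int) + (k:Int)) + j) 0) (fun _ => 32)]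
    simp only [List.nil_append, List.map_map]
    -- slice to take/drop
    have hb1 : ((0:Int) + 16 * (k:Int)) = ((16 * k : Nat) : Int) := by push_cast; ring
    rw [hb1]
    have hb2 : (((16 * k : Nat) : Int) + 16) = ((16 * k : Nat) : Int) + ((16 : Nat) : Int) := by push_cast; ring
    rw [hb2, PySem.List.slice_natCast_add padded (16 * k) 16]
    apply List.ext_getElem
    · simp [hlenpad]; omega
    · intro j hj1 hj2
      have hj : j < 16 := by simpa using hj1
      simp only [List.getElem_map, List.getElem_range, Function.comp_apply, List.getElem_take,
        List.getElem_drop]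
      have hidx : (16 * ((0:Int) + (k:Int)) + ((0:Int) + (j:Int))) = ((16 * k + j : Nat) : Int) := by
        push_cast; ring
      rw [hidx]
      by_cases hlt : 16 * k + j < n
      · rw [if_pos (by exact_mod_cast hlt)]
        rw [PySem.List.pyGetD_natCast, List.getD_eq_getElem message 0 hlt]
        simp only [hpad]
        exact (List.getElem_append_left hlt).symm
      · rw [if_neg (by exact_mod_cast hlt)]
        have hge : n ≤ 16 * k + j := Nat.le_of_not_lt hlt
        simp only [hpad]
        rw [List.getElem_append_right (by simpa [hn] using hge)]
        simp

-- ===== VERDICT (by name: the statement is the Claim_ definition above) =====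
theorem message_to_blocks_spec : Claim_equal_message_to_blocks := by
  intro message _
  unfold Spec_message_to_blocks
  exact blocks_eq message
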